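-- pv_equiv track=rewrite | github.com/osvennersjo/trafikverket-monitor | answer_product_question/if_describing.py | evaluate_intents_for_product
-- ===== SOURCE A (Python) =====
-- from typing import Dict, List, Tuple, Optional
--
-- def evaluate_intents_for_product(intent_tags: Dict[str, float], product: Dict) -> Optional[str]:
--     """Evaluate product suitability deterministically based on tags.
--     Returns a natural-language answer if confident, otherwise None (meaning fall back to LLM).
--     """
--     if not intent_tags:
--         return None
--
--     tags = str(product.get('tags', '')).lower()
--     category = str(product.get('category', '')).lower()
--     title = product.get('title', 'This ski')
--
--     responses = []
--     confident = True  # If any intent cannot be answered confidently, fall back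
--
--     def positive(tlist):
--         return any(t in tags or t in category for t in tlist)
--
--     for intent in intent_tags:
--         if intent.startswith('function_offpiste'):
--             if positive(['off-piste', 'powder', 'freeride', 'backcountry']):
--                 responses.append("Yes, it will work very well in off-piste conditions.")
--             else:
--                 responses.append("It is not optimised for off-piste skiing.")
--         elif intent.startswith('function_piste'):
--             if positive(['piste', 'carving', 'all-mountain']):
--                 responses.append("Yes, it performs well on groomed pistes.")
--             else:
--                 responses.append("Piste performance is not its strongest side.")
--         elif intent.startswith('function_park'):
--             if positive(['park', 'freestyle', 'jibbing', 'rails']):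
--                 responses.append("Yes, it is designed for park/freestyle riding.")
--             else:
--                 responses.append("It is not really built for park skiing.")
--         elif intent.startswith('skill_beginner'):
--             if positive(['beginner', 'forgiving', 'easy']):
--                 responses.append("Yes, it is suitable for beginners.")
--             else:
--                 responses.append("It might be demanding for absolute beginners.")
--         elif intent.startswith('performance_stability'):
--             if positive(['stable', 'stability', 'control', 'titanal']):
--                 responses.append("It offers good stability at speed.")
--             else:
--                 responses.append("Stability is average rather than exceptional.")
--         elif intent.startswith('performance_weight'):
--             if positive(['lightweight', 'light', 'carbon']):
--                 responses.append("Yes, it is considered lightweight.")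
--             else:
--                 responses.append("It has a standard weight construction, not especially light.")
--         else:
--             confident = False  # Unknown intent -> fallback
--
--     if not confident:
--         return None
--
--     # Concatenate responses into single paragraph
--     return ' '.join(responses)
-- ===== SOURCE B (Python) =====
-- RULES = [
--     ("function_offpiste", ["off-piste", "powder", "freeride", "backcountry"],
--      "Yes, it will work very well in off-piste conditions.",
--      "It is not optimised for off-piste skiing."),
--     ("function_piste", ["piste", "carving", "all-mountain"],
--      "Yes, it performs well on groomed pistes.",
--      "Piste performance is not its strongest side."),
--     ("function_park", ["park", "freestyle", "jibbing", "rails"],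
--      "Yes, it is designed for park/freestyle riding.",
--      "It is not really built for park skiing."),
--     ("skill_beginner", ["beginner", "forgiving", "easy"],
--      "Yes, it is suitable for beginners.",
--      "It might be demanding for absolute beginners."),
--     ("performance_stability", ["stable", "stability", "control", "titanal"],
--      "It offers good stability at speed.",
--      "Stability is average rather than exceptional."),
--     ("performance_weight", ["lightweight", "light", "carbon"],
--      "Yes, it is considered lightweight.",
--      "It has a standard weight construction, not especially light."),
-- ]
--
--
-- def evaluate_intents_for_product(intent_tags, product):
--     """Stage 1: decide every rule's verdict once per product (keyword matching is
--     independent of the intents).  Stage 2: walk the intents BACK-TO-FRONT with a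
--     string accumulator, returning None immediately on an unknown intent."""
--     if not intent_tags:
--         return None
--     tags = str(product.get('tags', '')).lower()
--     category = str(product.get('category', '')).lower()
--     verdicts = [(prefix, yes if any(k in tags or k in category for k in kws) else no)
--                 for prefix, kws, yes, no in RULES]
--
--     paragraph = ''
--     for intent in reversed(list(intent_tags)):
--         text = None
--         for prefix, t in verdicts:
--             if intent.startswith(prefix):
--                 text = t
--                 break
--         if text is None:
--             return None  # unknown intent -> fall back
--         paragraph = text if paragraph == '' else text + ' ' + paragraph
--     return paragraph
-- ===== Notes on version B (the rewrite author's own statement) =====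
-- stated objective: alternative
-- what changed: Keyword matching is hoisted out of the per-intent loop into a once-per-product verdict table, and the paragraph is assembled back-to-front by string concatenation with an early return on unknown intents, instead of A's forward loop that re-runs the keyword search per intent, collects a list, tracks a confident flag and joins at the end.
import Mathlib
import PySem

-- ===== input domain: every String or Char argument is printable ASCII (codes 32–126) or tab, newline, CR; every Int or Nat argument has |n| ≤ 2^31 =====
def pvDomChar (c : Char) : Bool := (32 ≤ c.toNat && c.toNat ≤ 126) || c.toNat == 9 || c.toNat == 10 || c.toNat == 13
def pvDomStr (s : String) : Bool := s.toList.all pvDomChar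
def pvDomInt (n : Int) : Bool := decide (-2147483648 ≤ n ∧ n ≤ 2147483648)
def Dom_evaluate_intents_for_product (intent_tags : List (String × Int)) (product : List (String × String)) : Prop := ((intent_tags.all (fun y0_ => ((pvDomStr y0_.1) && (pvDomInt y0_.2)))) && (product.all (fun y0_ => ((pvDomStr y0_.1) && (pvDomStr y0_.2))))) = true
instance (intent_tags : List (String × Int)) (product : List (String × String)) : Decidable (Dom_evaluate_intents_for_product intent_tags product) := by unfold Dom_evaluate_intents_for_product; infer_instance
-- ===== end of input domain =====

-- B hoists the keyword matching out of the per-intent loop into a once-per-product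
-- verdict table and assembles the answer back-to-front by string concatenation with
-- an early return on unknown intents; objective: alternative (same result).

-- ===== PORT A =====
-- positive(tlist): any(t in tags or t in category for t in tlist)
def pvPosA (tags category : String) (tlist : List String) : Bool :=
  tlist.any (fun t => PySem.Str.isIn t tags || PySem.Str.isIn t category)

-- the body of A's for-loop: state = (responses, confident)
def pvStepA (tags category : String) (st : List String × Bool) (intent : String) : List String × Bool :=
  if PySem.Str.startswith intent "function_offpiste" then
    (st.1 ++ [if pvPosA tags category ["off-piste", "powder", "freeride", "backcountry"] then
      "Yes, it will work very well in off-piste conditions." else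
      "It is not optimised for off-piste skiing."], st.2)
  else if PySem.Str.startswith intent "function_piste" then
    (st.1 ++ [if pvPosA tags category ["piste", "carving", "all-mountain"] then
      "Yes, it performs well on groomed pistes." else
      "Piste performance is not its strongest side."], st.2)
  else if PySem.Str.startswith intent "function_park" then
    (st.1 ++ [if pvPosA tags category ["park", "freestyle", "jibbing", "rails"] then
      "Yes, it is designed for park/freestyle riding." else
      "It is not really built for park skiing."], st.2)
  else if PySem.Str.startswith intent "skill_beginner" then
    (st.1 ++ [if pvPosA tags category ["beginner", "forgiving", "easy"] then
      "Yes, it is suitable for beginners." else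
      "It might be demanding for absolute beginners."], st.2)
  else if PySem.Str.startswith intent "performance_stability" then
    (st.1 ++ [if pvPosA tags category ["stable", "stability", "control", "titanal"] then
      "It offers good stability at speed." else
      "Stability is average rather than exceptional."], st.2)
  else if PySem.Str.startswith intent "performance_weight" then
    (st.1 ++ [if pvPosA tags category ["lightweight", "light", "carbon"] then
      "Yes, it is considered lightweight." else
      "It has a standard weight construction, not especially light."], st.2)
  else
    (st.1, false)  -- unknown intent -> fallback

-- the Python arguments are dicts: duplicate keys in the association lists collapse
-- (last value wins, first-occurrence position), modelled by PySem.Dict.ofList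
def evaluate_intents_for_product (intent_tags : List (String × Int)) (product : List (String × String)) : Option String :=
  if intent_tags.isEmpty then none
  else
    let p := PySem.Dict.ofList product
    let tags := PySem.Str.lower (p.getD "tags" "")
    let category := PySem.Str.lower (p.getD "category" "")
    let st := (PySem.Dict.ofList intent_tags).keys.foldl (pvStepA tags category) ([], true)
    if !st.2 then none
    else some (PySem.Str.join " " st.1)

-- ===== PORT B =====
-- the RULES table from Source B: (prefix, keywords, yes-text, no-text)
def pvRulesB : List (String × List String × String × String) :=
  [("function_offpiste", (["off-piste", "powder", "freeride", "backcountry"],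
    "Yes, it will work very well in off-piste conditions.",
    "It is not optimised for off-piste skiing.")),
   ("function_piste", (["piste", "carving", "all-mountain"],
    "Yes, it performs well on groomed pistes.",
    "Piste performance is not its strongest side.")),
   ("function_park", (["park", "freestyle", "jibbing", "rails"],
    "Yes, it is designed for park/freestyle riding.",
    "It is not really built for park skiing.")),
   ("skill_beginner", (["beginner", "forgiving", "easy"],
    "Yes, it is suitable for beginners.",
    "It might be demanding for absolute beginners.")),
   ("performance_stability", (["stable", "stability", "control", "titanal"],
    "It offers good stability at speed.",
    "Stability is average rather than exceptional.")),
   ("performance_weight", (["lightweight", "light", "carbon"],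
    "Yes, it is considered lightweight.",
    "It has a standard weight construction, not especially light."))]

-- stage 1: the verdict comprehension — one (prefix, chosen text) pair per rule
def pvVerdicts (tags category : String) : List (String × String) :=
  pvRulesB.map (fun r =>
    (r.1, if r.2.1.any (fun k => PySem.Str.isIn k tags || PySem.Str.isIn k category)
          then r.2.2.1 else r.2.2.2))

-- the inner for-loop with break: first verdict whose prefix matches
def pvLookup : List (String × String) → String → Option String
  | [], _ => none
  | (pre, t) :: rest, intent =>
    if PySem.Str.startswith intent pre then some t else pvLookup rest intent

-- stage 2: the reversed for-loop with accumulator 'paragraph' and early return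
def pvBuildRev (v : List (String × String)) : List String → String → Option String
  | [], acc => some acc
  | i :: rest, acc =>
    match pvLookup v i with
    | none => none
    | some t =>
      pvBuildRev v rest (if acc = "" then t
                         else String.ofList (t.toList ++ ' ' :: acc.toList))  -- t + ' ' + acc

def evaluate_intents_for_product_alt (intent_tags : List (String × Int)) (product : List (String × String)) : Option String :=
  if intent_tags.isEmpty then none
  else
    let p := PySem.Dict.ofList product
    let tags := PySem.Str.lower (p.getD "tags" "")
    let category := PySem.Str.lower (p.getD "category" "")
    pvBuildRev (pvVerdicts tags category) (PySem.Dict.ofList intent_tags).keys.reverse ""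

-- ===== PRECONDITION & SPEC =====
def Spec_evaluate_intents_for_product (intent_tags : List (String × Int)) (product : List (String × String)) (out : Option String) : Prop := out = evaluate_intents_for_product_alt intent_tags product
instance (intent_tags : List (String × Int)) (product : List (String × String)) (out : Option String) : Decidable (Spec_evaluate_intents_for_product intent_tags product out) := by unfold Spec_evaluate_intents_for_product; infer_instance

-- ===== CLAIM =====
def Claim_equal_evaluate_intents_for_product : Prop := ∀ (intent_tags : List (String × Int)) (product : List (String × String)), Dom_evaluate_intents_for_product intent_tags product → Spec_evaluate_intents_for_product intent_tags product (evaluate_intents_for_product intent_tags product)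

-- ===== LEMMAS AND PROOFS =====
-- one step of A's loop, written through B's verdict lookup
theorem pvStepA_eq (tags category : String) (st : List String × Bool) (intent : String) :
    pvStepA tags category st intent =
      match pvLookup (pvVerdicts tags category) intent with
      | some r => (st.1 ++ [r], st.2)
      | none => (st.1, false) := by
  simp only [pvStepA, pvVerdicts, pvRulesB, List.map, pvLookup, pvPosA]
  split_ifs <;> rfl

theorem pvFoldA_eq (tags category : String) (keys : List String) (acc : List String) (conf : Bool) :
    keys.foldl (pvStepA tags category) (acc, conf) =
      (acc ++ keys.filterMap (pvLookup (pvVerdicts tags category)),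
       conf && keys.all (fun k => (pvLookup (pvVerdicts tags category) k).isSome)) := by
  induction keys generalizing acc conf with
  | nil => simp
  | cons k ks ih =>
    simp only [List.foldl_cons, pvStepA_eq, List.filterMap_cons, List.all_cons]
    cases h : pvLookup (pvVerdicts tags category) k with
    | none => simp [ih]
    | some r => simp [ih]

theorem pvLookup_mem {v : List (String × String)} {i t : String}
    (h : pvLookup v i = some t) : ∃ p ∈ v, p.2 = t := by
  induction v with
  | nil => simp [pvLookup] at h
  | cons hd tl ih =>
    obtain ⟨pre, x⟩ := hd
    simp only [pvLookup] at h
    split_ifs at h with hs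
    · exact ⟨(pre, x), List.mem_cons_self, Option.some.inj h⟩
    · obtain ⟨p, hp, hpt⟩ := ih h
      exact ⟨p, List.mem_cons_of_mem _ hp, hpt⟩

theorem pvVerdicts_ne_empty (tags category : String) :
    ∀ p ∈ pvVerdicts tags category, p.2 ≠ "" := by
  intro p hp
  simp only [pvVerdicts, pvRulesB, List.map, List.mem_cons, List.not_mem_nil, or_false] at hp
  rcases hp with h | h | h | h | h | h <;> subst h <;> dsimp <;> split <;> decide

theorem pvJoin_nonempty {parts : List String} (hne : parts ≠ [])
    (h : ∀ x ∈ parts, x ≠ "") : PySem.Str.join " " parts ≠ "" := by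
  intro hc
  have := congrArg String.toList hc
  rw [PySem.Str.toList_join] at this
  match parts, hne with
  | [x], _ =>
    simp only [List.map, PySem.Chars.join_singleton] at this
    exact h x (by simp) (by rw [← String.ofList_toList (s := x), this]; rfl)
  | x :: y :: rest, _ =>
    simp only [List.map, PySem.Chars.join_cons_cons] at this
    simp at this

-- combining one more text on the left equals joining the longer list
theorem pvCombine_eq (t : String) (parts : List String) (h : ∀ x ∈ parts, x ≠ "") :
    (if PySem.Str.join " " parts = "" then t
     else String.ofList (t.toList ++ ' ' :: (PySem.Str.join " " parts).toList)) =
      PySem.Str.join " " (t :: parts) := by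
  cases parts with
  | nil =>
    simp [PySem.Str.join, PySem.Chars.join_nil, PySem.Chars.join_singleton,
      String.ofList_toList]
  | cons x xs =>
    rw [if_neg (pvJoin_nonempty (by simp) h)]
    apply String.toList_inj.mp
    simp only [String.toList_ofList, PySem.Str.toList_join, List.map,
      PySem.Chars.join_cons_cons]
    simp

theorem pvBuildRev_eq (v : List (String × String)) (hv : ∀ p ∈ v, p.2 ≠ "") :
    ∀ (R : List String) (parts : List String), (∀ x ∈ parts, x ≠ "") →
    pvBuildRev v R (PySem.Str.join " " parts) =
      if R.all (fun k => (pvLookup v k).isSome)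
      then some (PySem.Str.join " " (R.reverse.filterMap (pvLookup v) ++ parts))
      else none := by
  intro R
  induction R with
  | nil => intro parts _; simp [pvBuildRev]
  | cons r R' ih =>
    intro parts hparts
    simp only [pvBuildRev]
    obtain hl | ⟨t, hl⟩ := (pvLookup v r).eq_none_or_eq_some
    · rw [hl]; simp [List.all_cons, hl]
    · rw [hl]; dsimp only
      have ht : t ≠ "" := by
        obtain ⟨p, hp, hpt⟩ := pvLookup_mem hl
        exact hpt ▸ hv p hp
      have hparts' : ∀ x ∈ t :: parts, x ≠ "" := by
        intro x hx
        rcases List.mem_cons.mp hx with h1 | h1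
        · exact h1 ▸ ht
        · exact hparts x h1
      rw [pvCombine_eq t parts hparts, ih (t :: parts) hparts']
      by_cases hall : R'.all (fun k => (pvLookup v k).isSome)
      · simp [hall, hl, List.all_cons, List.reverse_cons, List.filterMap_append]
      · simp [hall, List.all_cons]

theorem pvAnyIsSome (f : String → Option String) (l : List String) :
    l.reverse.all (fun k => (f k).isSome) = l.all (fun k => (f k).isSome) := by
  simp [List.all_reverse]

-- ===== VERDICT =====
theorem evaluate_intents_for_product_spec : Claim_equal_evaluate_intents_for_product := by
  intro intent_tags product _
  unfold Spec_evaluate_intents_for_product evaluate_intents_for_product evaluate_intents_for_product_alt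
  by_cases h : intent_tags.isEmpty
  · simp [h]
  · simp only [h]
    set tags := PySem.Str.lower ((PySem.Dict.ofList product).getD "tags" "")
    set category := PySem.Str.lower ((PySem.Dict.ofList product).getD "category" "")
    set keys := (PySem.Dict.ofList intent_tags).keys
    have hjoin : (PySem.Str.join " " ([] : List String)) = "" := rfl
    rw [pvFoldA_eq, ← hjoin,
      pvBuildRev_eq (pvVerdicts tags category) (pvVerdicts_ne_empty tags category)
        keys.reverse [] (by simp)]
    rw [pvAnyIsSome]
    by_cases hall : keys.all (fun k => (pvLookup (pvVerdicts tags category) k).isSome)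
    · simp [hall]
    · simp [hall]
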